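-- pv_equiv track=rewrite | github.com/jackalsin/Python | 15112/Quiz/Q4P.py | isNearlySorted
-- ===== SOURCE A (Python) =====
-- def isNearlySorted(L):
--     if L== sorted(L):
--         return False
--     for i in range(len(L)):
--         for j in range(i,len(L)):
--             L[i],L[j]=L[j],L[i]
--             if L==sorted(L):
--                 return True
--             L[i],L[j]=L[j],L[i]
--     return False # place your answer here!
-- ===== SOURCE B (Python) =====
-- def isNearlySorted(L):
--     S = sorted(L)
--     diffs = [k for k in range(len(L)) if L[k] != S[k]]
--     if not diffs:
--         return False
--     i, j = diffs[0], diffs[-1]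
--     M = L[:]
--     M[i], M[j] = M[j], M[i]
--     return M == S
-- ===== Notes on version B (the rewrite author's own statement) =====
-- stated objective: faster
-- what changed: A tries every pair (i,j), swapping and re-sorting to test each candidate; B sorts once, collects the mismatched positions against the sorted list, and tests the single swap of the first and last mismatch.
import Mathlib
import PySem

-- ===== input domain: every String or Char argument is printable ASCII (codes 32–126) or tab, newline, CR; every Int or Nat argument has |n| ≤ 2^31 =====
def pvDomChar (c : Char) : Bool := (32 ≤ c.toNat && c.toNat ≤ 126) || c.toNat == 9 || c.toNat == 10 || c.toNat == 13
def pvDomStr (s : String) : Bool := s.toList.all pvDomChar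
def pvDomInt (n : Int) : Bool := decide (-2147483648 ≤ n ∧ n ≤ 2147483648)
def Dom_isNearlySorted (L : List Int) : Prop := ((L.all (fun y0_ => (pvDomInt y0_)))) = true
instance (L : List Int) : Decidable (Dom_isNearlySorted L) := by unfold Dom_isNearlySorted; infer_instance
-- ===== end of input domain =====

-- B replaces A's brute force over all O(n^2) swaps (each checked by sorting) with one sort plus a
-- single swap of the first and last mismatched positions; return-value equivalence only (Python A
-- mutates L transiently, leaving it swapped when it returns True; B never mutates its argument).

-- shared swap idiom: M[i], M[j] = M[j], M[i] (indices always in range at the call sites)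
def pySwap (L : List Int) (i j : Nat) : List Int :=
  (L.set i (L.getD j 0)).set j (L.getD i 0)

-- ===== PORT A =====
def isNearlySorted (L : List Int) : Bool :=
  if L = PySem.List.sorted L (fun x => x) false then false
  else
    (List.range L.length).any (fun i =>
      (List.range' i (L.length - i)).any (fun j =>
        decide (pySwap L i j = PySem.List.sorted (pySwap L i j) (fun x => x) false)))

-- ===== PORT B =====
def isNearlySorted_alt (L : List Int) : Bool :=
  let S := PySem.List.sorted L (fun x => x) false
  let diffs := (List.range L.length).filter (fun k => L.getD k 0 != S.getD k 0)
  if diffs.isEmpty then false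
  else decide (pySwap L (diffs.headD 0) (diffs.getLastD 0) = S)

-- ===== PRECONDITION & SPEC =====
def Spec_isNearlySorted (L : List Int) (out : Bool) : Prop := out = isNearlySorted_alt L
instance (L : List Int) (out : Bool) : Decidable (Spec_isNearlySorted L out) := by unfold Spec_isNearlySorted; infer_instance

-- ===== CLAIM (what is proved, stated in full; the proofs are below) =====
def Claim_equal_isNearlySorted : Prop := ∀ (L : List Int), Dom_isNearlySorted L → Spec_isNearlySorted L (isNearlySorted L)

-- ===== LEMMAS AND PROOFS =====

theorem cons_set_perm (xs : List Int) (j : Nat) (hj : j < xs.length) (x : Int) :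
    (xs.getD j 0 :: xs.set j x).Perm (x :: xs) := by
  have hxs : xs = xs.take j ++ xs[j] :: xs.drop (j+1) := by
    conv_lhs => rw [← List.take_append_drop j xs]
    rw [List.getElem_cons_drop]
  rw [List.getD_eq_getElem _ _ hj, List.set_eq_take_cons_drop x hj]
  refine (List.Perm.cons _ List.perm_middle).trans ?_
  refine (List.Perm.swap x (xs[j]) _).trans ?_
  refine (List.Perm.cons _ List.perm_middle.symm).trans ?_
  rw [← hxs]

-- swapping two in-range positions permutes the list
theorem pySwap_perm (L : List Int) : ∀ (i j : Nat), i < L.length → j < L.length →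
    (pySwap L i j).Perm L := by
  induction L with
  | nil => intro i j hi _; simp at hi
  | cons x xs ih =>
    intro i j hi hj
    match i, j with
    | 0, 0 => simp [pySwap]
    | 0, j+1 =>
      have hj' : j < xs.length := by simpa using hj
      simpa [pySwap] using cons_set_perm xs j hj' x
    | i+1, 0 =>
      have hi' : i < xs.length := by simpa using hi
      simpa [pySwap] using cons_set_perm xs i hi' x
    | i+1, j+1 =>
      have hi' : i < xs.length := by simpa using hi
      have hj' : j < xs.length := by simpa using hj
      simpa [pySwap] using List.Perm.cons x (ih i j hi' hj')

-- sorting a rearrangement gives the same sorted list (so A's "M == sorted(M)" is "M == sorted(L)")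
theorem sorted_of_perm_eq (L M : List Int) (h : M.Perm L) :
    PySem.List.sorted M (fun x => x) false = PySem.List.sorted L (fun x => x) false :=
  PySem.List.sorted_eq_sorted_of_perm _ _ _ (fun _ _ h => h) h

theorem pySwap_self (L : List Int) (i : Nat) (hi : i < L.length) : pySwap L i i = L := by
  have h2 : L.set i (L.getD i 0) = L := by
    rw [List.getD_eq_getElem _ _ hi]; exact List.set_getElem_self hi
  unfold pySwap
  rw [h2, h2]

theorem getD_pySwap_right (L : List Int) (i j : Nat) (hj : j < L.length) :
    (pySwap L i j).getD j 0 = L.getD i 0 := by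
  have h1 : j < ((L.set i (L.getD j 0)).set j (L.getD i 0)).length := by simp [hj]
  unfold pySwap
  rw [List.getD_eq_getElem _ _ h1]
  simp

theorem getD_pySwap_left (L : List Int) (i j : Nat) (hi : i < L.length)
    (hne : i ≠ j) : (pySwap L i j).getD i 0 = L.getD j 0 := by
  have h1 : i < ((L.set i (L.getD j 0)).set j (L.getD i 0)).length := by simp [hi]
  unfold pySwap
  rw [List.getD_eq_getElem _ _ h1]
  simp [Ne.symm hne, hi]

theorem getD_pySwap_other (L : List Int) (i j k : Nat) (hki : k ≠ i) (hkj : k ≠ j) :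
    (pySwap L i j).getD k 0 = L.getD k 0 := by
  unfold pySwap
  simp [List.getD, List.getElem?_set_ne (Ne.symm hki), List.getElem?_set_ne (Ne.symm hkj)]

-- elementwise characterisation of list equality via getD
theorem eq_iff_getD (L S : List Int) (hlen : L.length = S.length) :
    L = S ↔ ∀ k < L.length, L.getD k 0 = S.getD k 0 := by
  constructor
  · intro h k _; rw [h]
  · intro h
    apply List.ext_getElem hlen
    intro k h1 h2
    have := h k h1
    rwa [List.getD_eq_getElem _ _ h1, List.getD_eq_getElem _ _ h2] at this

theorem range_filter_one (i n : Nat) (hi : i < n) :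
    (List.range n).filter (fun k => decide (k = i)) = [i] := by
  induction n with
  | zero => omega
  | succ n ih =>
    rw [List.range_succ, List.filter_append]
    rcases Nat.lt_succ_iff_lt_or_eq.mp hi with h | h
    · rw [ih h]; simp; omega
    · subst h
      have : (List.range i).filter (fun k => decide (k = i)) = [] := by
        apply List.filter_eq_nil_iff.mpr; intro k hk; simp at hk ⊢; omega
      rw [this]; simp

theorem range_filter_two (i j n : Nat) (hij : i < j) (hj : j < n) :
    (List.range n).filter (fun k => decide (k = i ∨ k = j)) = [i, j] := by
  induction n with
  | zero => omega
  | succ n ih =>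
    rw [List.range_succ, List.filter_append]
    rcases Nat.lt_succ_iff_lt_or_eq.mp hj with h | h
    · rw [ih h]; simp; omega
    · subst h
      have h2 : (List.range j).filter (fun k => decide (k = i ∨ k = j)) =
          (List.range j).filter (fun k => decide (k = i)) := by
        apply List.filter_congr; intro k hk; simp at hk ⊢; omega
      rw [h2, range_filter_one i j hij]; simp

-- ===== VERDICT (by name: the statement is the Claim_ definition above) =====
theorem isNearlySorted_spec : Claim_equal_isNearlySorted := by
  intro L _
  simp only [Spec_isNearlySorted, isNearlySorted, isNearlySorted_alt]
  set S := PySem.List.sorted L (fun x => x) false with hSdef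
  have hlen : S.length = L.length := PySem.List.length_sorted ..
  by_cases hLS : L = S
  · rw [if_pos hLS]
    have hfil : (List.range L.length).filter (fun k => L.getD k 0 != S.getD k 0) = [] := by
      apply List.filter_eq_nil_iff.mpr
      intro k _; simp [← hLS]
    rw [hfil]
    simp
  · rw [if_neg hLS]
    have hfilne : (List.range L.length).filter (fun k => L.getD k 0 != S.getD k 0) ≠ [] := by
      have hdiff : ∃ k < L.length, L.getD k 0 ≠ S.getD k 0 := by
        by_contra hc
        push Not at hc
        exact hLS ((eq_iff_getD L S hlen.symm).mpr hc)
      obtain ⟨k, hk, hne⟩ := hdiff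
      intro hnil
      have hmem : k ∈ (List.range L.length).filter (fun k => L.getD k 0 != S.getD k 0) :=
        List.mem_filter.mpr ⟨List.mem_range.mpr hk, bne_iff_ne.mpr hne⟩
      rw [hnil] at hmem
      exact absurd hmem (List.not_mem_nil)
    rw [if_neg (by simpa [List.isEmpty_iff] using hfilne)]
    rw [Bool.eq_iff_iff]
    simp only [List.any_eq_true, List.mem_range, List.mem_range'_1, decide_eq_true_eq]
    constructor
    · rintro ⟨i, hi, j, ⟨hij_le, hjlt⟩, hcond⟩
      have hj : j < L.length := by omega
      rw [sorted_of_perm_eq L _ (pySwap_perm L i j hi hj), ← hSdef] at hcond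
      have hij : i ≠ j := by
        intro h; subst h; rw [pySwap_self L i hi] at hcond; exact hLS hcond
      have hlt : i < j := lt_of_le_of_ne hij_le hij
      have hSk : ∀ k, S.getD k 0 = (pySwap L i j).getD k 0 := by intro k; rw [hcond]
      have eSi : S.getD i 0 = L.getD j 0 := by rw [hSk i, getD_pySwap_left L i j hi hij]
      have eSj : S.getD j 0 = L.getD i 0 := by rw [hSk j, getD_pySwap_right L i j hj]
      have eSo : ∀ k, k ≠ i → k ≠ j → S.getD k 0 = L.getD k 0 := by
        intro k h1 h2; rw [hSk k, getD_pySwap_other L i j k h1 h2]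
      have hPi : L.getD i 0 ≠ S.getD i 0 := by
        intro hEi
        apply hLS
        rw [eq_iff_getD L S hlen.symm]
        intro k _
        by_cases hki : k = i
        · subst hki; exact hEi
        by_cases hkj : k = j
        · subst hkj; rw [eSj, hEi, eSi]
        · exact (eSo k hki hkj).symm
      have hPj : L.getD j 0 ≠ S.getD j 0 := by
        intro hEj
        apply hLS
        rw [eq_iff_getD L S hlen.symm]
        intro k _
        by_cases hki : k = i
        · subst hki; rw [eSi, hEj, eSj]
        by_cases hkj : k = j
        · subst hkj; exact hEj
        · exact (eSo k hki hkj).symm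
      have hfil2 : (List.range L.length).filter (fun k => L.getD k 0 != S.getD k 0) = [i, j] := by
        rw [List.filter_congr (q := fun k => decide (k = i ∨ k = j)) (fun k _ => ?_),
          range_filter_two i j L.length hlt hj]
        by_cases hki : k = i
        · subst hki
          rw [show (L.getD k 0 != S.getD k 0) = true from bne_iff_ne.mpr hPi]
          simp
        by_cases hkj : k = j
        · subst hkj
          rw [show (L.getD k 0 != S.getD k 0) = true from bne_iff_ne.mpr hPj]
          simp
        · rw [show (L.getD k 0 != S.getD k 0) = false from
            bne_eq_false_iff_eq.mpr (eSo k hki hkj).symm]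
          simp [hki, hkj]
      rw [hfil2]
      simpa using hcond
    · intro hB
      obtain ⟨d, t, hDt⟩ : ∃ d t,
          (List.range L.length).filter (fun k => L.getD k 0 != S.getD k 0) = d :: t := by
        cases hc : (List.range L.length).filter (fun k => L.getD k 0 != S.getD k 0) with
        | nil => exact absurd hc hfilne
        | cons d t => exact ⟨d, t, rfl⟩
      have hmemD : ∀ x ∈ d :: t, x < L.length := by
        intro x hx
        have : x ∈ (List.range L.length).filter (fun k => L.getD k 0 != S.getD k 0) := by
          rw [hDt]; exact hx
        have := List.mem_range.mp (List.mem_of_mem_filter this)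
        exact this
      have hpw : (d :: t).Pairwise (· < ·) := by
        rw [← hDt]; exact List.Pairwise.filter _ (List.pairwise_lt_range)
      rw [hDt] at hB
      set j0 := (d :: t).getLastD 0 with hj0
      have hj0mem : j0 ∈ d :: t := by
        rw [hj0, List.getLastD_cons]; exact List.getLastD_mem_cons
      have hdn : d < L.length := hmemD d (by simp)
      have hj0n : j0 < L.length := hmemD j0 hj0mem
      have hle : d ≤ j0 := by
        rcases List.mem_cons.mp hj0mem with h | h
        · omega
        · have := (List.pairwise_cons.mp hpw).1 j0 h; omega
      refine ⟨d, hdn, j0, ⟨hle, by omega⟩, ?_⟩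
      rw [sorted_of_perm_eq L _ (pySwap_perm L d j0 hdn hj0n), ← hSdef]
      simpa using hB
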